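-- pv_equiv track=rewrite | github.com/wonjun6715/coding_test | 프로그래머스/unrated/135808. 과일 장수/과일 장수.py | solution
-- ===== SOURCE A (Python) =====
-- def solution(k, m, score):
--     answer = sorted(score, reverse=True)
--     result = []
--     price = 0
--     for i in range(0, len(answer), m):
--         if i >= len(answer):
--             break
--         result.append(answer[i:i+m])
--     for i in range(len(result)):
--         if len(result[i]) == m:
--             price = price + (result[i][len(result[i]) - 1] * m)
--     return price
-- ===== SOURCE B (Python) =====
-- def solution(k, m, score):
--     s = sorted(score)
--     return m * sum(s[i] for i in range(len(s) - m, -1, -m))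
-- ===== Notes on version B (the rewrite author's own statement) =====
-- stated objective: simpler
-- what changed: B replaces A's chunk-building (slice the descending sort into m-sized sublists, collect them in a list, then scan the full ones for their last element) by a direct index formula: sort ascending once and sum every m-th element starting at index len-m going down, times m; no intermediate chunk list is built.
import Mathlib
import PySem

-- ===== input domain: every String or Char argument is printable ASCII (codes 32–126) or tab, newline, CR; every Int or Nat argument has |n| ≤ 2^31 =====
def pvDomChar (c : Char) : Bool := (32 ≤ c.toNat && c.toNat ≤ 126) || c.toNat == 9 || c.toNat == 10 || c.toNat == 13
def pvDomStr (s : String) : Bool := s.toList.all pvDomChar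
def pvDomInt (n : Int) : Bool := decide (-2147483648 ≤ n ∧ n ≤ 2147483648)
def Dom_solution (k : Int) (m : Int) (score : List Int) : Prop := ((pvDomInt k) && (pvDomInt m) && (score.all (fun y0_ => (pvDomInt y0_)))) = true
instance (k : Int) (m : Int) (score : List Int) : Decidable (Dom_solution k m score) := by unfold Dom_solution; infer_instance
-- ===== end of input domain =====

-- B sorts ascending once and sums every m-th element from index len-m downward, times m,
-- instead of A's slicing the descending sort into chunk lists and scanning the full ones (objective: simpler).


-- ===== PORT A =====
-- first loop of A: 'for i in range(0, len(answer), m): if i >= len(answer): break; result.append(answer[i:i+m])'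
def solutionChunks (answer : List Int) (m : Int) : List Int → List (List Int) → List (List Int)
  | [], result => result
  | i :: rest, result =>
    if (answer.length : Int) ≤ i then result
    else solutionChunks answer m rest (result ++ [PySem.List.slice answer (some i) (some (i + m))])

def solution (k : Int) (m : Int) (score : List Int) : Int :=
  let answer := PySem.List.sorted score (fun x => x) true
  let result := solutionChunks answer m (PySem.List.pyRange 0 (answer.length : Int) m) []
  (PySem.List.pyRange 0 (result.length : Int) 1).foldl
    (fun price i =>
      let chunk := PySem.List.pyGetD result i []
      if (chunk.length : Int) = m then
        price + (PySem.List.pyGetD chunk ((chunk.length : Int) - 1) 0) * m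
      else price) 0

-- ===== PORT B =====
def solution_alt (k : Int) (m : Int) (score : List Int) : Int :=
  let s := PySem.List.sorted score (fun x => x) false
  m * ((PySem.List.pyRange ((s.length : Int) - m) (-1) (-m)).foldl
        (fun acc i => acc + PySem.List.pyGetD s i 0) 0)

-- ===== PRECONDITION & SPEC =====
-- Pre_ excludes exactly m = 0, where Python's range(0, len, 0) raises ValueError in both A and B.
def Pre_solution (k : Int) (m : Int) (score : List Int) : Prop := m ≠ 0
instance (k : Int) (m : Int) (score : List Int) : Decidable (Pre_solution k m score) := by unfold Pre_solution; infer_instance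

def pvWitness_solution : Int × Int × List Int := (4, 2, [4, 1, 3, 2, 2])

def Spec_solution (k : Int) (m : Int) (score : List Int) (out : Int) : Prop := out = solution_alt k m score
instance (k : Int) (m : Int) (score : List Int) (out : Int) : Decidable (Spec_solution k m score out) := by unfold Spec_solution; infer_instance

-- ===== CLAIM (what is proved, stated in full; the proofs are below) =====
def Claim_equal_solution : Prop := ∀ (k : Int) (m : Int) (score : List Int), Dom_solution k m score → Pre_solution k m score → Spec_solution k m score (solution k m score)

-- ===== LEMMAS AND PROOFS =====

-- sorted(xs, reverse=True) on plain integers is the reverse of sorted(xs)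
lemma sorted_rev_eq_reverse (xs : List Int) :
    PySem.List.sorted xs (fun x => x) true = (PySem.List.sorted xs (fun x => x) false).reverse := by
  apply PySem.List.eq_of_perm_of_pairwise_le_of_injective (key := fun x : Int => -x) neg_injective
  · exact (PySem.List.sorted_perm xs _ true).trans
      ((PySem.List.sorted_perm xs _ false).symm.trans (List.reverse_perm _).symm)
  · exact (PySem.List.sorted_pairwise_rev xs _).imp (by intro h; omega)
  · rw [List.pairwise_reverse]
    exact (PySem.List.sorted_pairwise xs _).imp (by intro h; omega)

-- A's first loop never hits the break: it appends one slice per range element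
lemma solutionChunks_eq (answer : List Int) (m : Int) (l : List Int) (res : List (List Int))
    (h : ∀ i ∈ l, i < (answer.length : Int)) :
    solutionChunks answer m l res
      = res ++ l.map (fun i => PySem.List.slice answer (some i) (some (i + m))) := by
  induction l generalizing res with
  | nil => simp [solutionChunks]
  | cons x t ih =>
      have hx : ¬ ((answer.length : Int) ≤ x) := by
        have := h x (by simp); omega
      simp only [solutionChunks, if_neg hx, List.map_cons]
      rw [ih _ (fun i hi => h i (by simp [hi]))]
      simp

-- empty ranges
lemma pyRange_nil_of_neg (a b s : Int) (hs : s < 0) (hab : a ≤ b) : PySem.List.pyRange a b s = [] := by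
  simp [PySem.List.pyRange, show ¬ s = 0 by omega, show ¬ 0 < s by omega, show ¬ b < a by omega]

lemma pyRange_nil_of_pos (a b s : Int) (hs : 0 < s) (hab : b ≤ a) : PySem.List.pyRange a b s = [] := by
  simp [PySem.List.pyRange, show ¬ s = 0 by omega, hs, show ¬ a < b by omega]

-- the positive-m core: with s the ascending sort, A's two loops over s.reverse compute B's sum

lemma pyRange_of_neg (a b s : Int) (hs : s < 0) :
    PySem.List.pyRange a b s =
      (List.range (if b < a then ((a - b + -s - 1) / -s).toNat else 0)).map (fun k : Nat => a + s * (k : Int)) := by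
  simp [PySem.List.pyRange, show ¬ s = 0 by omega, show ¬ 0 < s by omega]

lemma lt_mul_div_succ (a b : Nat) (h : 0 < b) : a < b * (a / b + 1) := by
  have h1 := Nat.div_add_mod a b
  have h2 := Nat.mod_lt a h
  rw [Nat.mul_succ]
  set t := b * (a / b)
  omega

lemma rangeA (n mn : Nat) (hmn : 0 < mn) :
    PySem.List.pyRange 0 (n : Int) (mn : Int)
      = (List.range ((n + mn - 1) / mn)).map (fun k : Nat => 0 + (mn : Int) * (k : Int)) := by
  rw [PySem.List.pyRange_of_pos 0 (n : Int) (by exact_mod_cast hmn)]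
  congr 1
  split_ifs with h0
  · rw [show ((n : Int) - 0 + mn - 1) = ((n + mn - 1 : Nat) : Int) by
      push_cast [Nat.cast_sub (show 1 ≤ n + mn by omega)]; ring]
    rw [← Int.natCast_ediv, Int.toNat_natCast]
  · have hn0 : n = 0 := by omega
    subst hn0
    exact congrArg List.range (Nat.div_eq_of_lt (by omega)).symm

lemma rangeB (n mn : Nat) (hmn : 0 < mn) :
    PySem.List.pyRange ((n : Int) - mn) (-1) (-(mn : Int))
      = (List.range (n / mn)).map (fun k : Nat => (n : Int) - mn + (-(mn : Int)) * (k : Int)) := by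
  rw [pyRange_of_neg _ _ _ (show -(mn : Int) < 0 by omega)]
  congr 1
  split_ifs with h0
  · rw [show ((n : Int) - mn - (-1) + -(-(mn : Int)) - 1) = (n : Int) by ring, neg_neg]
    rw [← Int.natCast_ediv, Int.toNat_natCast]
  · have : n < mn := by omega
    exact congrArg List.range (Nat.div_eq_of_lt this).symm

lemma pos_case (mn : Nat) (hmn : 0 < mn) (s : List Int) :
    ((PySem.List.pyRange 0 ((s.reverse.length : Int)) (mn : Int)).map
        (fun i => PySem.List.slice s.reverse (some i) (some (i + (mn : Int))))).foldl
      (fun price chunk =>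
        if (chunk.length : Int) = (mn : Int) then
          price + (PySem.List.pyGetD chunk ((chunk.length : Int) - 1) 0) * (mn : Int)
        else price) 0
    = (mn : Int) * ((PySem.List.pyRange ((s.length : Int) - (mn : Int)) (-1) (-(mn : Int))).foldl
        (fun acc i => acc + PySem.List.pyGetD s i 0) 0) := by
  simp only [List.length_reverse]
  rw [rangeA s.length mn hmn, rangeB s.length mn hmn]
  set n := s.length with hn
  set q := n / mn with hq
  have hle : q ≤ (n + mn - 1) / mn := Nat.div_le_div_right (by omega)
  rw [List.foldl_map, List.foldl_map, List.foldl_map,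
      show (n + mn - 1) / mn = q + ((n + mn - 1) / mn - q) by omega,
      List.range_add, List.foldl_append]
  -- first segment: full chunks
  rw [PySem.List.foldl_congr_mem (List.range q) _
      (fun acc k => acc + s.getD (n - mn * (k + 1)) 0 * (mn : Int)) 0 (by
    intro acc k hk
    beta_reduce
    rw [List.mem_range] at hk
    have hk1 : mn * k + mn ≤ n := by
      have h' := (Nat.le_div_iff_mul_le hmn).mp (show k + 1 ≤ q by omega)
      have h'' : mn * k + mn = (k + 1) * mn := by ring
      omega
    have hchunk : PySem.List.slice s.reverse (some (0 + (mn : Int) * k))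
        (some (0 + (mn : Int) * k + mn)) = (s.reverse.drop (mn * k)).take mn := by
      rw [show (0 + (mn : Int) * (k : Nat)) = ((mn * k : Nat) : Int) by push_cast; ring,
          show ((mn * k : Nat) : Int) + (mn : Int) = ((mn * k + mn : Nat) : Int) by push_cast; ring,
          PySem.List.slice_natCast]
      congr 1
      omega
    rw [hchunk]
    have hlen : ((s.reverse.drop (mn * k)).take mn).length = mn := by
      simp only [List.length_take, List.length_drop, List.length_reverse, ← hn]
      omega
    rw [hlen, if_pos rfl,
        show ((mn : Int) - 1) = ((mn - 1 : Nat) : Int) by omega,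
        PySem.List.pyGetD_natCast,
        List.getD_eq_getElem _ _ (by rw [hlen]; omega),
        List.getElem_take, List.getElem_drop, List.getElem_reverse,
        List.getD_eq_getElem _ _ (show n - mn * (k + 1) < n by rw [Nat.mul_succ]; omega)]
    simp only [← hn,
      show n - 1 - (mn * k + (mn - 1)) = n - mn * (k + 1) by rw [Nat.mul_succ]; omega])]
  -- second segment: the (at most one) short chunk contributes nothing
  rw [PySem.List.foldl_congr_mem _ _ (fun acc _ => acc) _ (by
    intro acc x hx
    beta_reduce
    rw [List.mem_map] at hx
    obtain ⟨j, hj, rfl⟩ := hx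
    have hbase : n < mn * (q + 1) := lt_mul_div_succ n mn hmn
    have hmono : mn * (q + 1) ≤ mn * (q + j + 1) := Nat.mul_le_mul_left _ (by omega)
    have hsucc : mn * (q + j + 1) = mn * (q + j) + mn := Nat.mul_succ _ _
    have hchunk : PySem.List.slice s.reverse (some (0 + (mn : Int) * (q + j : Nat)))
        (some (0 + (mn : Int) * (q + j : Nat) + mn)) = (s.reverse.drop (mn * (q + j))).take mn := by
      rw [show (0 + (mn : Int) * ((q + j : Nat) : Int)) = ((mn * (q + j) : Nat) : Int) by push_cast; ring,
          show ((mn * (q + j) : Nat) : Int) + (mn : Int) = ((mn * (q + j) + mn : Nat) : Int) by push_cast; ring,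
          PySem.List.slice_natCast]
      congr 1
      omega
    rw [hchunk]
    have hlen : ((s.reverse.drop (mn * (q + j))).take mn).length < mn := by
      simp only [List.length_take, List.length_drop, List.length_reverse, ← hn]
      omega
    rw [if_neg (by exact_mod_cast Nat.ne_of_lt hlen)])]
  rw [PySem.List.foldl_ignore]
  -- B side
  rw [PySem.List.foldl_congr_mem (List.range q)
      (fun (acc : Int) (y : Nat) => acc + PySem.List.pyGetD s ((n : Int) - (mn : Int) + (-(mn : Int)) * (y : Int)) 0)
      (fun acc k => acc + s.getD (n - mn * (k + 1)) 0) 0 (by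
    intro acc k hk
    beta_reduce
    rw [List.mem_range] at hk
    have hk1 : mn * (k + 1) ≤ n := by
      have h' := (Nat.le_div_iff_mul_le hmn).mp (show k + 1 ≤ q by omega)
      have h'' : mn * (k + 1) = (k + 1) * mn := by ring
      omega
    rw [show ((n : Int) - mn + (-(mn : Int)) * (k : Nat)) = ((n - mn * (k + 1) : Nat) : Int) by
          push_cast [Nat.cast_sub hk1]; ring,
        PySem.List.pyGetD_natCast])]
  rw [PySem.List.foldl_add (g := fun k => s.getD (n - mn * (k + 1)) 0 * (mn : Int)),
      PySem.List.foldl_add (g := fun k => s.getD (n - mn * (k + 1)) 0)]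
  rw [List.sum_map_mul_right]
  ring

-- ===== VERDICT (by name: the statement is the Claim_ definition above) =====
theorem solution_spec : Claim_equal_solution := by
  intro k m score _ hpre
  unfold Pre_solution at hpre
  unfold Spec_solution solution solution_alt
  dsimp only
  rw [sorted_rev_eq_reverse]
  set s := PySem.List.sorted score (fun x => x) false with hs
  rcases lt_trichotomy m 0 with hm | hm | hm
  · rw [pyRange_nil_of_neg _ _ _ hm (by positivity)]
    simp only [solutionChunks, List.length_nil, Nat.cast_zero]
    rw [pyRange_nil_of_pos 0 0 1 one_pos le_rfl,
        pyRange_nil_of_pos _ _ _ (show (0 : Int) < -m by omega)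
          (show (-1 : Int) ≤ (s.length : Int) - m by
            have : (0 : Int) ≤ (s.length : Int) := by positivity
            omega)]
    simp
  · exact absurd hm hpre
  · obtain ⟨mn, rfl⟩ : ∃ mn : Nat, m = (mn : Int) := ⟨m.toNat, by omega⟩
    have hmn : 0 < mn := by exact_mod_cast hm
    rw [solutionChunks_eq _ _ _ []
        (fun i hi => ((PySem.List.mem_pyRange_iff_of_pos hm i).mp hi).2.1), List.nil_append]
    rw [PySem.List.foldl_pyRange_zero_pyGetD' _ []
        (fun price chunk =>
          if (chunk.length : Int) = (mn : Int) then
            price + (PySem.List.pyGetD chunk ((chunk.length : Int) - 1) 0) * (mn : Int)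
          else price) 0]
    exact pos_case mn hmn s
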